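-- pv_equiv track=rewrite | github.com/raymondfdavey/pythonistas | 3/challenge1_solution.py | check_ticket
-- ===== SOURCE A (Python) =====
-- def check_ticket(my_ticket, winning_numbers):
--     matches = 0
--     for x in my_ticket:
--         for y in winning_numbers:
--             if x == y:
--                 matches += 1
--     if matches == 2:
--         return 1
--     elif matches == 3:
--         return 10
--     elif matches == 4:
--         return 50
--     elif matches == 5:
--         return 500
--     elif matches == 6:
--         return 1000000
--     else:
--         return 0
-- ===== SOURCE B (Python) =====
-- def check_ticket(my_ticket, winning_numbers):
--     cm = {}
--     for x in my_ticket: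
--         cm[x] = cm.get(x, 0) + 1
--     cw = {}
--     for y in winning_numbers:
--         cw[y] = cw.get(y, 0) + 1
--     matches = sum(v * cw.get(k, 0) for k, v in cm.items())
--     return {2: 1, 3: 10, 4: 50, 5: 500, 6: 1000000}.get(matches, 0)
-- ===== Notes on version B (the rewrite author's own statement) =====
-- stated objective: faster
-- what changed: Replaces the quadratic double loop over all ticket/winning pairs by frequency dictionaries built in one pass each, summing count products over distinct ticket values, and maps the match count to the prize via a table lookup instead of an if-chain.
import Mathlib
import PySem

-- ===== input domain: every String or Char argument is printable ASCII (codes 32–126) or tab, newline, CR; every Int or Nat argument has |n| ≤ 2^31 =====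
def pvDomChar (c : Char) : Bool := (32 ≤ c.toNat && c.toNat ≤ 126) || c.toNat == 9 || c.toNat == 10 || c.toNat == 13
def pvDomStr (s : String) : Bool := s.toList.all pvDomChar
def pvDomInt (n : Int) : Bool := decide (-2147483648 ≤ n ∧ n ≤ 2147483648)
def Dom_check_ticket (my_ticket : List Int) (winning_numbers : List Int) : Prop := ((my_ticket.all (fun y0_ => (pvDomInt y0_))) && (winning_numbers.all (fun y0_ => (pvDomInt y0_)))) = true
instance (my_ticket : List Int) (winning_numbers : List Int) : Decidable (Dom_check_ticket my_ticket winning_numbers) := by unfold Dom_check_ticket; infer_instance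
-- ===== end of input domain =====

-- B replaces A's quadratic pairwise loop by two frequency dictionaries and a count-product
-- sum over distinct ticket values, with a table lookup for the prize tier (objective: faster).

-- ===== PORT A =====
def check_ticket (my_ticket : List Int) (winning_numbers : List Int) : Int :=
  let m : Int := my_ticket.foldl
    (fun acc x => winning_numbers.foldl (fun a y => if x == y then a + 1 else a) acc) 0
  if m = 2 then 1
  else if m = 3 then 10
  else if m = 4 then 50
  else if m = 5 then 500
  else if m = 6 then 1000000
  else 0

-- ===== PORT B =====
def check_ticket_alt (my_ticket : List Int) (winning_numbers : List Int) : Int :=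
  let cm : PySem.Dict Int Int :=
    my_ticket.foldl (fun d x => d.insert x (d.getD x 0 + 1)) PySem.Dict.empty
  let cw : PySem.Dict Int Int :=
    winning_numbers.foldl (fun d y => d.insert y (d.getD y 0 + 1)) PySem.Dict.empty
  let m : Int := (cm.items.map (fun p => p.2 * cw.getD p.1 0)).sum
  (PySem.Dict.ofList [(2, 1), (3, 10), (4, 50), (5, 500), (6, 1000000)]).getD m 0

-- ===== PRECONDITION & SPEC =====
def Spec_check_ticket (my_ticket : List Int) (winning_numbers : List Int) (out : Int) : Prop := out = check_ticket_alt my_ticket winning_numbers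
instance (my_ticket : List Int) (winning_numbers : List Int) (out : Int) : Decidable (Spec_check_ticket my_ticket winning_numbers out) := by unfold Spec_check_ticket; infer_instance

-- ===== CLAIM (what is proved, stated in full; the proofs are below) =====
def Claim_equal_check_ticket : Prop := ∀ (my_ticket : List Int) (winning_numbers : List Int), Dom_check_ticket my_ticket winning_numbers → Spec_check_ticket my_ticket winning_numbers (check_ticket my_ticket winning_numbers)

-- ===== LEMMAS AND PROOFS =====

-- A's match count is the sum over ticket entries of their multiplicity in winning_numbers.
theorem matchesA_eq (t w : List Int) :
    t.foldl (fun acc x => w.foldl (fun a y => if x == y then a + 1 else a) acc) 0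
      = (t.map (fun x => (w.count x : Int))).sum := by
  have : t.foldl (fun acc x => w.foldl (fun a y => if x == y then a + 1 else a) acc) 0
      = t.foldl (fun acc x => acc + (w.count x : Int)) 0 := by
    apply PySem.List.foldl_congr_mem
    intro acc x _
    rw [PySem.List.foldl_if_add_one]
    have hc : w.countP (fun y => x == y) = w.count x :=
      List.countP_congr (fun a _ => by by_cases h : x = a <;> simp [h, Ne.symm])
    rw [hc]
  rw [this, PySem.List.foldl_add]
  simp

-- Summing f over a list equals summing (count · * f ·) over its distinct elements.
theorem sum_map_eq_dedup_count_mul (t : List Int) (f : Int → Int) :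
    (t.map f).sum
      = ((PySem.Set.ofList t).map (fun k => (t.count k : Int) * f k)).sum := by
  rw [Finset.sum_list_map_count t f,
      ← List.sum_toFinset (fun k => (t.count k : Int) * f k) (PySem.Set.nodup_ofList t)]
  have hfs : (PySem.Set.ofList t).toFinset = t.toFinset := by
    ext x; simp [PySem.Set.mem_ofList]
  rw [hfs]
  refine Finset.sum_congr rfl ?_
  intro m _
  simp

-- B's match count equals the same sum of multiplicities.
theorem matchesB_eq (t w : List Int) :
    (((t.foldl (fun d x => d.insert x (d.getD x 0 + 1)) PySem.Dict.empty).items.map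
        (fun p => p.2 * (w.foldl (fun d y => d.insert y (d.getD y 0 + 1)) PySem.Dict.empty).getD p.1 0)).sum)
      = (t.map (fun x => (w.count x : Int))).sum := by
  rw [PySem.Dict.foldl_insert_getD_add_one_eq_counter,
      PySem.Dict.foldl_insert_getD_add_one_eq_counter,
      PySem.Dict.items_counter]
  simp only [List.map_map, Function.comp_def, PySem.Dict.getD_counter]
  exact (sum_map_eq_dedup_count_mul t (fun x => (w.count x : Int))).symm

theorem tier_eq (m : Int) :
    (if m = 2 then (1:Int) else if m = 3 then 10 else if m = 4 then 50
      else if m = 5 then 500 else if m = 6 then 1000000 else 0)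
      = (PySem.Dict.ofList [((2:Int), (1:Int)), (3, 10), (4, 50), (5, 500), (6, 1000000)]).getD m 0 := by
  have h : (PySem.Dict.ofList [((2:Int), (1:Int)), (3, 10), (4, 50), (5, 500), (6, 1000000)])
      = PySem.Dict.mk [((2:Int), (1:Int)), (3, 10), (4, 50), (5, 500), (6, 1000000)] := by decide
  rw [h]
  simp only [PySem.Dict.getD, PySem.Dict.get?_mk_cons]
  split_ifs <;> simp_all [PySem.Dict.get?]

-- ===== VERDICT (by name: the statement is the Claim_ definition above) =====
theorem check_ticket_spec : Claim_equal_check_ticket := by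
  intro t w _
  unfold Spec_check_ticket check_ticket check_ticket_alt
  simp only [matchesA_eq, matchesB_eq, tier_eq]
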